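-- pv_equiv track=rewrite | github.com/surinkwon/TIL | python/SWEA/1216_회문 2/1216_회문 2.py | palindrome_len
-- ===== SOURCE A (Python) =====
-- def palindrome_len(lst):
--     word = lst[::]
--     while len(word) > 1:
--         if word[0] == word[-1]:
--             word = word[1:len(word) - 1]
--         else:
--             break
--
--     if len(word) == 1 or len(word) == 0:
--         return len(lst)
--     elif len(word) > 1:
--         return 0
-- ===== SOURCE B (Python) =====
-- def palindrome_len(lst):
--     i, j = 0, len(lst) - 1
--     while i < j:
--         if lst[i] != lst[j]:
--             return 0
--         i += 1
--         j -= 1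
--     return len(lst)
-- ===== Notes on version B (the rewrite author's own statement) =====
-- stated objective: faster
-- what changed: Replaced A's repeated list slicing (each while-iteration copies the remaining sublist) with an in-place two-pointer scan comparing ends inward, no copies.
import Mathlib
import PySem

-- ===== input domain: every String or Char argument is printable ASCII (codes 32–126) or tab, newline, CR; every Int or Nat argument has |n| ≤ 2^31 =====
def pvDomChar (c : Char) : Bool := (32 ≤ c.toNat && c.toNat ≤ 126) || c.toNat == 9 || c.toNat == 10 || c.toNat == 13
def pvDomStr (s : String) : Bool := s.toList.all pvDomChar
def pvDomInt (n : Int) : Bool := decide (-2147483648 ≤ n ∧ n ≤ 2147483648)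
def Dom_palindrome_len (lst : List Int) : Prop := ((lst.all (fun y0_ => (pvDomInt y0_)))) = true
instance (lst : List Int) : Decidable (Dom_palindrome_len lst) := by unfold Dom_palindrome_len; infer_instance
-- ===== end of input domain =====

-- B replaces A's repeated list slicing (quadratic copying) with a two-pointer scan; return values proved equal.

-- ===== PORT A =====
-- the while loop: word is the shrinking sliced copy
def pvALoop (word : List Int) : List Int :=
  if h : word.length > 1 then
    if PySem.List.pyGetD word 0 0 = PySem.List.pyGetD word (-1) 0 then
      pvALoop (PySem.List.slice word (some 1) (some ((word.length : Int) - 1)))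
    else word
  else word
termination_by word.length
decreasing_by
  rw [PySem.List.slice_toNat word (by omega) (by omega)]
  have := List.length_take_le (((word.length:Int) - 1).toNat - (1:Int).toNat) (word.drop (1:Int).toNat)
  simp at this ⊢
  omega

def palindrome_len (lst : List Int) : Int :=
  let word := pvALoop (PySem.List.slice lst none none)   -- word = lst[::], then the while loop
  if word.length = 1 ∨ word.length = 0 then (lst.length : Int)
  else 0   -- len(word) > 1 is the only remaining case (lengths are ≥ 0)

-- ===== PORT B =====
-- the while loop of Source B: two pointers i, j moving inward
def pvBLoop (lst : List Int) (i j : Int) : Int :=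
  if h : i < j then
    if PySem.List.pyGetD lst i 0 ≠ PySem.List.pyGetD lst j 0 then 0
    else pvBLoop lst (i + 1) (j - 1)
  else (lst.length : Int)
termination_by (j - i).toNat
decreasing_by omega

def palindrome_len_alt (lst : List Int) : Int :=
  pvBLoop lst 0 ((lst.length : Int) - 1)

-- ===== PRECONDITION & SPEC =====
def Spec_palindrome_len (lst : List Int) (out : Int) : Prop := out = palindrome_len_alt lst
instance (lst : List Int) (out : Int) : Decidable (Spec_palindrome_len lst out) := by unfold Spec_palindrome_len; infer_instance

-- ===== CLAIM (what is proved, stated in full; the proofs are below) =====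
def Claim_equal_palindrome_len : Prop := ∀ (lst : List Int), Dom_palindrome_len lst → Spec_palindrome_len lst (palindrome_len lst)

-- ===== LEMMAS AND PROOFS =====

-- a list of length ≤ 1 is its own reverse
theorem pv_short_pal {l : List Int} (h : l.length ≤ 1) : l = l.reverse := by
  match l, h with
  | [], _ => rfl
  | [a], _ => rfl

-- palindrome characterisation of a two-ended decomposition
theorem pv_pal_cons_concat (a b : Int) (m : List Int) :
    (a :: (m ++ [b])) = (a :: (m ++ [b])).reverse ↔ a = b ∧ m = m.reverse := by
  constructor
  · intro h
    have h' : a :: (m ++ [b]) = b :: (m.reverse ++ [a]) := by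
      simpa using h
    have hab : a = b := by simpa using congrArg (·.headI) h'
    refine ⟨hab, ?_⟩
    have := congrArg List.tail h'
    simp at this
    exact this.1
  · rintro ⟨rfl, hm⟩
    conv_lhs => rw [hm]
    simp

-- A's loop: the remaining word has length ≤ 1 exactly on palindromes
theorem pvALoop_pal : ∀ (w : List Int), (pvALoop w).length ≤ 1 ↔ w = w.reverse := by
  intro w
  induction w using pvALoop.induct with
  | case1 w h heq ih =>
    -- w.length > 1, ends equal
    obtain ⟨a, t, rfl⟩ : ∃ a t, w = a :: t := by
      cases w with
      | nil => simp at h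
      | cons a t => exact ⟨a, t, rfl⟩
    obtain ⟨m, b, rfl⟩ : ∃ m b, t = m ++ [b] := by
      rcases List.eq_nil_or_concat t with rfl | ⟨m, b, hmb⟩
      · simp at h
      · exact ⟨m, b, by simpa using hmb⟩
    have hlen : (a :: (m ++ [b])).length = m.length + 2 := by simp
    have hsl : PySem.List.slice (a :: (m ++ [b])) (some 1) (some (((a :: (m ++ [b])).length : Int) - 1)) = m := by
      rw [PySem.List.slice_toNat _ (by omega) (by simp; omega)]
      simp
    have hab : a = b := by
      have := heq
      rw [show (a :: (m ++ [b])) = ((a :: m) ++ [b]) by simp] at this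
      rw [PySem.List.pyGetD_neg_one_append_singleton] at this
      simpa using this
    rw [pvALoop]
    simp only [h, heq, if_true, dif_pos]
    rw [hsl] at ih ⊢
    rw [ih, pv_pal_cons_concat]
    tauto
  | case2 w h hne =>
    -- w.length > 1, ends differ: loop stops, not a palindrome
    rw [pvALoop]
    rw [dif_pos h, if_neg hne]
    constructor
    · intro hle; omega
    · intro hpal
      exfalso
      obtain ⟨a, t, rfl⟩ : ∃ a t, w = a :: t := by
        cases w with
        | nil => simp at h
        | cons a t => exact ⟨a, t, rfl⟩
      obtain ⟨m, b, rfl⟩ : ∃ m b, t = m ++ [b] := by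
        rcases List.eq_nil_or_concat t with rfl | ⟨m, b, hmb⟩
        · simp at h
        · exact ⟨m, b, by simpa using hmb⟩
      have hab : a = b := (pv_pal_cons_concat a b m).mp hpal |>.1
      apply hne
      rw [show (a :: (m ++ [b])) = ((a :: m) ++ [b]) by simp]
      rw [PySem.List.pyGetD_neg_one_append_singleton]
      simpa using hab
  | case3 w h =>
    -- w.length ≤ 1
    rw [pvALoop]
    simp only [h, dif_neg]
    have : w.length ≤ 1 := by omega
    exact ⟨fun _ => pv_short_pal this, fun _ => this⟩

-- decomposition of the window [i, j] of lst into first element, middle, last element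
theorem pv_window_decomp (lst : List Int) (i j : Int) (hi : 0 ≤ i) (h : i < j)
    (hjlen : j < (lst.length : Int)) :
    (lst.drop i.toNat).take (j - i + 1).toNat =
      lst[i.toNat]'(by omega) :: (((lst.drop (i.toNat + 1)).take (j - i - 1).toNat) ++ [lst[j.toNat]'(by omega)]) := by
  have hilen : i.toNat < lst.length := by omega
  rw [List.drop_eq_getElem_cons hilen]
  rw [show (j - i + 1).toNat = ((j - i - 1).toNat + 1) + 1 by omega]
  rw [List.take_succ_cons]
  congr 1
  rw [List.take_succ]
  have hidx : (j - i - 1).toNat < (lst.drop (i.toNat + 1)).length := by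
    simp; omega
  congr 1
  rw [List.getElem?_eq_getElem hidx]
  simp only [List.getElem_drop, Option.toList_some]
  simp [show i.toNat + 1 + ((j - i).toNat - 1) = j.toNat from by omega]

-- B's loop on the remaining window [i, j]
theorem pvBLoop_pal (lst : List Int) : ∀ (n : Nat) (i j : Int), (j - i).toNat ≤ n → 0 ≤ i →
    i + j = (lst.length : Int) - 1 →
    pvBLoop lst i j =
      (if ((lst.drop i.toNat).take (j - i + 1).toNat) = ((lst.drop i.toNat).take (j - i + 1).toNat).reverse
       then (lst.length : Int) else 0) := by
  intro n
  induction n with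
  | zero =>
    intro i j hn hi hij
    have h : ¬ i < j := by omega
    rw [pvBLoop, dif_neg h, if_pos]
    apply pv_short_pal
    have := List.length_take_le (j - i + 1).toNat (lst.drop i.toNat)
    simp at this ⊢
    omega
  | succ n ih =>
    intro i j hn hi hij
    by_cases h : i < j
    · have hjlen : j < (lst.length : Int) := by omega
      have hj0 : 0 ≤ j := by omega
      rw [pvBLoop, dif_pos h]
      by_cases hne : PySem.List.pyGetD lst i 0 ≠ PySem.List.pyGetD lst j 0
      · rw [if_pos hne, if_neg]
        rw [pv_window_decomp lst i j hi h hjlen, pv_pal_cons_concat]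
        rintro ⟨hab, -⟩
        apply hne
        rw [PySem.List.pyGetD_eq_getElem _ _ hi (by omega),
            PySem.List.pyGetD_eq_getElem _ _ hj0 (by omega)]
        exact hab
      · rw [if_neg hne]
        have heq' : PySem.List.pyGetD lst i 0 = PySem.List.pyGetD lst j 0 := not_ne_iff.mp hne
        have hab : lst[i.toNat]'(by omega) = lst[j.toNat]'(by omega) := by
          rwa [PySem.List.pyGetD_eq_getElem _ _ hi (by omega),
               PySem.List.pyGetD_eq_getElem _ _ hj0 (by omega)] at heq'
        rw [ih (i + 1) (j - 1) (by omega) (by omega) (by omega)]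
        rw [pv_window_decomp lst i j hi h hjlen]
        have hmid : (lst.drop (i + 1).toNat).take (j - 1 - (i + 1) + 1).toNat =
            (lst.drop (i.toNat + 1)).take (j - i - 1).toNat := by
          rw [show (i + 1).toNat = i.toNat + 1 by omega,
              show (j - 1 - (i + 1) + 1).toNat = (j - i - 1).toNat by omega]
        simp only [hmid]
        by_cases hm : (lst.drop (i.toNat + 1)).take (j - i - 1).toNat =
            ((lst.drop (i.toNat + 1)).take (j - i - 1).toNat).reverse
        · rw [if_pos hm, if_pos ((pv_pal_cons_concat _ _ _).mpr ⟨hab, hm⟩)]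
        · rw [if_neg hm, if_neg (fun hc => hm ((pv_pal_cons_concat _ _ _).mp hc).2)]
    · rw [pvBLoop, dif_neg h, if_pos]
      apply pv_short_pal
      have := List.length_take_le (j - i + 1).toNat (lst.drop i.toNat)
      simp at this ⊢
      omega

-- ===== VERDICT (by name: the statement is the Claim_ definition above) =====
theorem palindrome_len_spec : Claim_equal_palindrome_len := by
  intro lst _
  unfold Spec_palindrome_len palindrome_len palindrome_len_alt
  rw [PySem.List.slice_none_none]
  rw [pvBLoop_pal lst lst.length 0 ((lst.length : Int) - 1) (by omega) le_rfl (by ring)]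
  have hA := pvALoop_pal lst
  rw [show ((lst.length : Int) - 1 - 0 + 1).toNat = lst.length by omega]
  simp only [Int.toNat_zero, List.drop_zero, List.take_length]
  by_cases hp : lst = lst.reverse
  · rw [if_pos hp]
    have : (pvALoop lst).length ≤ 1 := hA.mpr hp
    rw [if_pos (by omega)]
  · rw [if_neg hp]
    have : ¬ (pvALoop lst).length ≤ 1 := fun hc => hp (hA.mp hc)
    rw [if_neg (by omega)]
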